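-- pv_equiv track=rewrite | github.com/Lily8605/30-functions | 30 functions.py | mostvowels
-- ===== SOURCE A (Python) =====
-- def mostvowels(ml):
--     def vowelscount(mstr):
--         return  sum(1 for el in mstr if el.lower() in "aeoui")
--     for i in range(len(ml)):
--         for j in range(len(ml)-1-i):
--             if vowelscount(ml[j])>vowelscount(ml[j+1]):
--                 ml[j],ml[j+1]=ml[j+1],ml[j]
--     return ml[-1]
-- ===== SOURCE B (Python) =====
-- def mostvowels(ml):
--     def vowelscount(mstr):
--         return sum(1 for el in mstr if el.lower() in "aeoui")
--     best = ml[0]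
--     bc = vowelscount(best)
--     for s in ml[1:]:
--         c = vowelscount(s)
--         if c >= bc:
--             best, bc = s, c
--     return best
-- ===== Notes on version B (the rewrite author's own statement) =====
-- stated objective: faster
-- what changed: Replaced A's in-place bubble sort by vowel count (then take last) with a single linear max-scan that keeps the last string attaining the maximum vowel count; B does not mutate ml (return value is identical).
import Mathlib
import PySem

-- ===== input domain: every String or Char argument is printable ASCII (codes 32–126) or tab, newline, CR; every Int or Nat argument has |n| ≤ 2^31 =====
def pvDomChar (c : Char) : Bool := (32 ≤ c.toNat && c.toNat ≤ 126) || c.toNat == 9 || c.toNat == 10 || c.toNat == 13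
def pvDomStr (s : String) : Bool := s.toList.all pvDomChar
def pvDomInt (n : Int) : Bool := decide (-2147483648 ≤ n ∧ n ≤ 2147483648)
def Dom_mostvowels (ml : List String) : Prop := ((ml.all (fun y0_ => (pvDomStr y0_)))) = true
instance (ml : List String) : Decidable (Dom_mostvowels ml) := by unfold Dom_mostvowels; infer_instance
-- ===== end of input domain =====

-- B replaces A's in-place bubble sort by vowel count (then take last) with one linear max-scan
-- keeping the last string attaining the maximum vowel count; A sorts ml in place while B does
-- not mutate it — the equivalence proved here is about the RETURN value only.

-- ===== PORT A =====
-- helper vowelscount: sum(1 for el in mstr if el.lower() in "aeoui")  (shared by both Pythons verbatim)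
def vowelscount (mstr : String) : Int :=
  (((mstr.toList.filter
      (fun el => PySem.Chars.isIn [PySem.Chars.lowerChar el] "aeoui".toList)).map
      (fun _ => (1 : Int))).sum)

-- one body of A's inner loop: compare ml[j], ml[j+1] and swap (the RHS of the Python swap is read first)
def bubbleStep (l : List String) (j : Int) : List String :=
  if vowelscount (PySem.List.pyGetD l j "") > vowelscount (PySem.List.pyGetD l (j + 1) "") then
    PySem.List.pySetD (PySem.List.pySetD l j (PySem.List.pyGetD l (j + 1) ""))
      (j + 1) (PySem.List.pyGetD l j "")
  else l

def mostvowels (ml : List String) : String :=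
  let n : Int := ml.length
  let ml' := (PySem.List.pyRange 0 n 1).foldl
      (fun l i => (PySem.List.pyRange 0 (n - 1 - i) 1).foldl bubbleStep l) ml
  PySem.List.pyGetD ml' (-1) ""

-- ===== PORT B =====
def mostvowels_alt (ml : List String) : String :=
  let best := PySem.List.pyGetD ml 0 ""
  let bc := vowelscount best
  ((PySem.List.slice ml (some 1) none).foldl
      (fun (st : String × Int) s =>
        let c := vowelscount s
        if c ≥ st.2 then (s, c) else st)
      (best, bc)).1

-- ===== PRECONDITION & SPEC =====
-- Pre_ excludes only the empty list: A raises IndexError there (ml[-1]), and B raises too (ml[0]).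
def Pre_mostvowels (ml : List String) : Prop := ml ≠ []
instance (ml : List String) : Decidable (Pre_mostvowels ml) := by unfold Pre_mostvowels; infer_instance
def pvWitness_mostvowels : List String := (["hello", "world"])
def Spec_mostvowels (ml : List String) (out : String) : Prop := out = mostvowels_alt ml
instance (ml : List String) (out : String) : Decidable (Spec_mostvowels ml out) := by unfold Spec_mostvowels; infer_instance

-- ===== CLAIM (what is proved, stated in full; the proofs are below) =====
def Claim_equal_mostvowels : Prop := ∀ (ml : List String), Dom_mostvowels ml → Pre_mostvowels ml → Spec_mostvowels ml (mostvowels ml)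

-- ===== LEMMAS AND PROOFS =====

-- the max-scan step: keep the later string on ties
def vstep (b s : String) : String := if vowelscount s ≥ vowelscount b then s else b

theorem foldB_eq (xs : List String) (b : String) :
    xs.foldl (fun (st : String × Int) s =>
        let c := vowelscount s
        if c ≥ st.2 then (s, c) else st) (b, vowelscount b)
      = (xs.foldl vstep b, vowelscount (xs.foldl vstep b)) := by
  induction xs generalizing b with
  | nil => rfl
  | cons x t ih =>
    simp only [List.foldl_cons, vstep]
    by_cases h : vowelscount x ≥ vowelscount b <;> simp [h, ih]

theorem alt_eq (ml : List String) :
    mostvowels_alt ml = ml.tail.foldl vstep (ml.getD 0 "") := by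
  unfold mostvowels_alt
  simp only [PySem.List.slice_from_one, PySem.List.pyGetD_zero]
  rw [foldB_eq]

theorem bubbleStep_length (l : List String) (j : Int) :
    (bubbleStep l j).length = l.length := by
  unfold bubbleStep; split_ifs <;> simp [PySem.List.length_pySetD]

theorem bubbleStep_getD_succ (l : List String) (j : Nat) (h : j + 1 < l.length) :
    (bubbleStep l (j : Int)).getD (j + 1) "" = vstep (l.getD j "") (l.getD (j + 1) "") := by
  unfold bubbleStep vstep
  have hc : (j : Int) + 1 = ((j + 1 : Nat) : Int) := by push_cast; ring
  rw [hc]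
  simp only [PySem.List.pyGetD_natCast, PySem.List.pySetD_natCast]
  split_ifs with h1 h2 h2
  · omega
  · simp [List.getD, h, List.length_set]
  · rfl
  · omega

theorem bubbleStep_getD_other (l : List String) (j m : Nat)
    (h1 : j ≠ m) (h2 : j + 1 ≠ m) :
    (bubbleStep l (j : Int)).getD m "" = l.getD m "" := by
  unfold bubbleStep
  have hc : (j : Int) + 1 = ((j + 1 : Nat) : Int) := by push_cast; ring
  rw [hc]
  simp only [PySem.List.pyGetD_natCast, PySem.List.pySetD_natCast]
  split_ifs
  · simp [List.getD, List.getElem?_set_ne h2, List.getElem?_set_ne h1]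
  · rfl

-- one inner loop over j = 0 .. k-1, with Nat indices
def natFold (k : Nat) (l : List String) : List String :=
  List.foldl (fun l (j : Nat) => bubbleStep l (j : Int)) l (List.range k)

theorem natFold_succ (k : Nat) (l : List String) :
    natFold (k + 1) l = bubbleStep (natFold k l) (k : Int) := by
  simp [natFold, List.range_succ]

theorem natFold_length (k : Nat) (l : List String) :
    (natFold k l).length = l.length := by
  induction k with
  | zero => rfl
  | succ k ih => rw [natFold_succ, bubbleStep_length, ih]

theorem natFold_keeps (b m : Nat) (l : List String) (hb : b < m) :
    (natFold b l).getD m "" = l.getD m "" := by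
  induction b with
  | zero => rfl
  | succ k ih =>
    rw [natFold_succ, bubbleStep_getD_other _ _ _ (by omega) (by omega), ih (by omega)]

-- first pass: after the inner loop up to k, slot k holds the running best of the first k+1
-- elements and everything beyond k is untouched
theorem pass0_inv (l : List String) (k : Nat) (hk : k < l.length) :
    (natFold k l).getD k "" = (l.tail.take k).foldl vstep (l.getD 0 "")
      ∧ ∀ m : Nat, k < m → (natFold k l).getD m "" = l.getD m "" := by
  induction k with
  | zero => simp [natFold]
  | succ k ih =>
    obtain ⟨ih1, ih2⟩ := ih (by omega)
    have hlen : k + 1 < (natFold k l).length := by rw [natFold_length]; exact hk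
    constructor
    · rw [natFold_succ, bubbleStep_getD_succ _ _ hlen, ih1, ih2 (k + 1) (by omega)]
      have htk : l.tail.take (k + 1) = l.tail.take k ++ [l.tail.getD k ""] := by
        rw [List.take_succ]
        congr 1
        have : k < l.tail.length := by simp [List.length_tail]; omega
        simp [List.getElem?_eq_getElem this, List.getD, this]
      rw [htk, List.foldl_append]
      simp only [List.foldl_cons, List.foldl_nil]
      congr 1
      simp [List.getD, List.getElem?_tail]
    · intro m hm
      rw [natFold_succ, bubbleStep_getD_other _ _ _ (by omega) (by omega), ih2 m (by omega)]

theorem pyFold_eq_natFold (b : Int) (hb : 0 ≤ b) (l : List String) :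
    (PySem.List.pyRange 0 b 1).foldl bubbleStep l = natFold b.toNat l := by
  rw [PySem.List.pyRange_zero, natFold]
  exact List.foldl_map

theorem getLast_eq_getD (l : List String) (h : l ≠ []) :
    l.getLast h = l.getD (l.length - 1) "" := by
  have hp : 0 < l.length := List.length_pos_iff.mpr h
  rw [List.getLast_eq_getElem, List.getD_eq_getElem _ _ (by omega)]

theorem mostvowels_eq (ml : List String) (h : ml ≠ []) :
    mostvowels ml = ml.tail.foldl vstep (ml.getD 0 "") := by
  have hN : 1 ≤ ml.length := List.length_pos_iff.mpr h
  unfold mostvowels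
  simp only []
  rw [PySem.List.pyRange_one_cons (by exact_mod_cast hN), List.foldl_cons]
  simp only [zero_add, sub_zero]
  rw [pyFold_eq_natFold _ (by omega)]
  have ht : ((ml.length : Int) - 1).toNat = ml.length - 1 := by omega
  rw [ht]
  have hP0 : (natFold (ml.length - 1) ml).length = ml.length ∧
      (natFold (ml.length - 1) ml).getD (ml.length - 1) ""
        = ml.tail.foldl vstep (ml.getD 0 "") := by
    refine ⟨natFold_length _ _, ?_⟩
    rw [(pass0_inv ml (ml.length - 1) (by omega)).1]
    congr 1
    exact List.take_of_length_le (by simp [List.length_tail])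
  have hmain : (List.foldl
        (fun l i => (PySem.List.pyRange 0 ((ml.length : Int) - 1 - i) 1).foldl bubbleStep l)
        (natFold (ml.length - 1) ml) (PySem.List.pyRange 1 (ml.length : Int) 1)).length = ml.length ∧
      (List.foldl
        (fun l i => (PySem.List.pyRange 0 ((ml.length : Int) - 1 - i) 1).foldl bubbleStep l)
        (natFold (ml.length - 1) ml) (PySem.List.pyRange 1 (ml.length : Int) 1)).getD
        (ml.length - 1) "" = ml.tail.foldl vstep (ml.getD 0 "") := by
    refine List.foldlRecOn (motive := fun (l' : List String) => l'.length = ml.length ∧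
      l'.getD (ml.length - 1) "" = ml.tail.foldl vstep (ml.getD 0 "")) _ _ hP0 ?_
    intro l hPl i hi
    obtain ⟨hi1, hi2⟩ := (PySem.List.mem_pyRange_one).mp hi
    rw [pyFold_eq_natFold _ (by omega)]
    refine ⟨by rw [natFold_length]; exact hPl.1, ?_⟩
    rw [natFold_keeps _ _ _ (by omega), hPl.2]
  rw [PySem.List.pyGetD_neg_one _ _ (by rw [← List.length_pos_iff, hmain.1]; omega)]
  rw [getLast_eq_getD, hmain.1]
  exact hmain.2

-- ===== VERDICT (by name: the statement is the Claim_ definition above) =====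
theorem mostvowels_spec : Claim_equal_mostvowels := by
  intro ml _ hpre
  unfold Spec_mostvowels
  rw [mostvowels_eq ml hpre, alt_eq]
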